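-- pv_equiv track=rewrite | github.com/jgraber/Python_Scripts | fileaway/fileaway.py | transform
-- ===== SOURCE A (Python) =====
-- def format_number(number):
--     # https://python-reference.readthedocs.io/en/latest/docs/str/rjust.html
--     return str(number).rjust(3, '0')
--
-- def transform(files: set, prefix: str) -> dict:
--     last_number_in_dir = {}
--     result = {}
--
--     for file in sorted(files, key=str.lower):
--         last_index = file.rindex('\\')
--         path, file_name = file[:last_index+1], file[last_index+1:]
--         current = last_number_in_dir.get(path, 0)
--         current = current + 1
--         current_formatted = format_number(current)
--         replaced_path = path.replace('\\', '_')
--         suffix = file[file.rindex("."):]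
--         new_name = f'{prefix}_{replaced_path}{current_formatted}{suffix}'
--         result[file] = new_name.replace("__", "_")
--         last_number_in_dir[path] = current
--
--     return result
-- ===== SOURCE B (Python) =====
-- def transform(files, prefix):
--     # stateless renumbering: the number of a file is the count of same-directory
--     # files at or before it in the lowercase-sorted order (no running counter dict)
--     ordered = sorted(files, key=str.lower)
--     result = {}
--     for i, file in enumerate(ordered):
--         cut = file.rindex('\\') + 1
--         path = file[:cut]
--         number = sum(1 for g in ordered[:i + 1] if g[:g.rindex('\\') + 1] == path)
--         new_name = (prefix + '_' + path.replace('\\', '_')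
--                     + str(number).rjust(3, '0') + file[file.rindex('.'):])
--         result[file] = new_name.replace('__', '_')
--     return result
-- ===== Notes on version B (the rewrite author's own statement) =====
-- stated objective: alternative
-- what changed: B drops A's running last-number-per-directory dict: each file's sequence number is recomputed statelessly as the count of same-directory files in the lowercase-sorted prefix up to and including it, so the loop carries no counter state.
import Mathlib
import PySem

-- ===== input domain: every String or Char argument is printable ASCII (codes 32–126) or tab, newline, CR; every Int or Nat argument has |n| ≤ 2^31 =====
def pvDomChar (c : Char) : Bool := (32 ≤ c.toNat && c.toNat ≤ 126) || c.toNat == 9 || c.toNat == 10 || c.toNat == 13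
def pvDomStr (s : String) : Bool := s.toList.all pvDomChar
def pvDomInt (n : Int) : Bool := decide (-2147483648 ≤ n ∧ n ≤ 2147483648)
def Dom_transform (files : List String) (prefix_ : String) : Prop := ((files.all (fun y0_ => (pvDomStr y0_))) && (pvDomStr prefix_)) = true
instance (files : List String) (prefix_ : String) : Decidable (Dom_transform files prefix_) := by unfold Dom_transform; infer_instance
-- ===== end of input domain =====

-- B replaces A's running per-directory counter dict by a stateless prefix count (alternative decomposition, same values).

-- ===== PORT A =====
-- str(number).rjust(3, '0'): exact for this single-char fill
def formatNumber (number : Int) : String :=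
  String.ofList (List.replicate (3 - (PySem.Int.toStr number).toList.length) '0'
    ++ (PySem.Int.toStr number).toList)

-- the body of A's for-loop, over the state (last_number_in_dir, result)
def transformStep (prefix_ : String)
    (st : PySem.Dict String Int × PySem.Dict String String) (file : String) :
    PySem.Dict String Int × PySem.Dict String String :=
  let lastIndex := PySem.Str.rfind file "\\"
  let path := PySem.Str.slice file none (some (lastIndex + 1))
  let _fileName := PySem.Str.slice file (some (lastIndex + 1)) none
  let current := st.1.getD path 0 + 1
  let currentFormatted := formatNumber current
  let replacedPath := PySem.Str.replace path "\\" "_"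
  let suffix := PySem.Str.slice file (some (PySem.Str.rfind file ".")) none
  let newName := prefix_ ++ "_" ++ replacedPath ++ currentFormatted ++ suffix
  (st.1.insert path current, st.2.insert file (PySem.Str.replace newName "__" "_"))

def transform (files : List String) (prefix_ : String) : List (String × String) :=
  ((PySem.List.sorted files PySem.Str.lower false).foldl (transformStep prefix_)
    (PySem.Dict.empty, PySem.Dict.empty)).2.items

-- ===== PORT B =====
-- B's 'for i, file in enumerate(ordered)' loop: i is the index, result the dict built
def altLoop (prefix_ : String) (ordered : List String) :
    Nat → PySem.Dict String String → List String → PySem.Dict String String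
  | _, result, [] => result
  | i, result, file :: rest =>
    let cut := PySem.Str.rfind file "\\" + 1
    let path := PySem.Str.slice file none (some cut)
    let number : Int :=
      ((PySem.List.slice ordered none (some ((i : Int) + 1))).countP
        (fun g => PySem.Str.slice g none (some (PySem.Str.rfind g "\\" + 1)) == path) : Nat)
    let newName := prefix_ ++ "_" ++ PySem.Str.replace path "\\" "_"
      ++ String.ofList (List.replicate (3 - (PySem.Int.toStr number).toList.length) '0'
          ++ (PySem.Int.toStr number).toList)
      ++ PySem.Str.slice file (some (PySem.Str.rfind file ".")) none
    altLoop prefix_ ordered (i + 1) (result.insert file (PySem.Str.replace newName "__" "_")) rest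

def transform_alt (files : List String) (prefix_ : String) : List (String × String) :=
  let ordered := PySem.List.sorted files PySem.Str.lower false
  (altLoop prefix_ ordered 0 PySem.Dict.empty ordered).items

-- ===== PRECONDITION & SPEC =====
-- Pre_ excludes exactly the inputs where Python A raises ValueError: a file
-- without a backslash or without a dot makes file.rindex raise.
def Pre_transform (files : List String) (prefix_ : String) : Prop :=
  ∀ f ∈ files, PySem.Str.isIn "\\" f = true ∧ PySem.Str.isIn "." f = true
instance (files : List String) (prefix_ : String) : Decidable (Pre_transform files prefix_) := by
  unfold Pre_transform; infer_instance
def pvWitness_transform : List String × String := (["a\\b.txt", "a\\c.txt", "a\\sub\\d.md"], "pre")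

def Spec_transform (files : List String) (prefix_ : String) (out : List (String × String)) : Prop := out = transform_alt files prefix_
instance (files : List String) (prefix_ : String) (out : List (String × String)) : Decidable (Spec_transform files prefix_ out) := by unfold Spec_transform; infer_instance

-- ===== CLAIM (what is proved, stated in full; the proofs are below) =====
def Claim_equal_transform : Prop := ∀ (files : List String) (prefix_ : String), Dom_transform files prefix_ → Pre_transform files prefix_ → Spec_transform files prefix_ (transform files prefix_)

-- ===== LEMMAS AND PROOFS =====

-- the directory part of a file, as both programs compute it
def pathOf (g : String) : String :=
  PySem.Str.slice g none (some (PySem.Str.rfind g "\\" + 1))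

-- the new name both programs build for a file numbered n
def nameStr (prefix_ file : String) (n : Int) : String :=
  PySem.Str.replace
    (prefix_ ++ "_" ++ PySem.Str.replace (pathOf file) "\\" "_" ++ formatNumber n
      ++ PySem.Str.slice file (some (PySem.Str.rfind file ".")) none) "__" "_"

lemma transformStep_eq (prefix_ : String) (st : PySem.Dict String Int × PySem.Dict String String)
    (file : String) :
    transformStep prefix_ st file =
      (st.1.insert (pathOf file) (st.1.getD (pathOf file) 0 + 1),
       st.2.insert file (nameStr prefix_ file (st.1.getD (pathOf file) 0 + 1))) := rfl

lemma altLoop_cons (prefix_ : String) (ordered : List String) (i : Nat)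
    (res : PySem.Dict String String) (file : String) (rest : List String) :
    altLoop prefix_ ordered i res (file :: rest) =
      altLoop prefix_ ordered (i + 1)
        (res.insert file (nameStr prefix_ file
          ((PySem.List.slice ordered none (some ((i : Int) + 1))).countP
            (fun g => pathOf g == pathOf file) : Nat))) rest := rfl

lemma altLoop_eq (prefix_ : String) (p r : List String)
    (lnd : PySem.Dict String Int) (res : PySem.Dict String String)
    (hinv : ∀ q, lnd.getD q 0 = ((p.countP (fun g => pathOf g == q)) : Int)) :
    (r.foldl (transformStep prefix_) (lnd, res)).2
      = altLoop prefix_ (p ++ r) p.length res r := by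
  induction r generalizing p lnd res with
  | nil => simp [altLoop]
  | cons file rest ih =>
    rw [List.foldl_cons, transformStep_eq, altLoop_cons]
    have hslice : PySem.List.slice (p ++ file :: rest) none (some ((p.length : Int) + 1))
        = p ++ [file] := by
      have h1 : ((p.length : Int) + 1) = ((p.length + 1 : Nat) : Int) := by push_cast; ring
      rw [h1, PySem.List.slice_to_natCast]
      rw [show p ++ file :: rest = (p ++ [file]) ++ rest by simp]
      exact List.take_left' (by simp)
    have hcount : ((PySem.List.slice (p ++ file :: rest) none (some ((p.length : Int) + 1))).countP
        (fun g => pathOf g == pathOf file) : Int)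
        = lnd.getD (pathOf file) 0 + 1 := by
      rw [hslice, List.countP_append, hinv]
      simp
    rw [hcount]
    have hinv' : ∀ q, (lnd.insert (pathOf file) (lnd.getD (pathOf file) 0 + 1)).getD q 0
        = (((p ++ [file]).countP (fun g => pathOf g == q)) : Int) := by
      intro q
      rw [PySem.Dict.getD_insert, List.countP_append, hinv]
      by_cases hq : q = pathOf file
      · subst hq; simp
      · simp only [beq_eq_false_iff_ne.mpr (fun h => hq h.symm), List.countP_cons,
          List.countP_nil, if_neg hq]
        simpa using hinv q
    have := ih (p ++ [file]) (lnd.insert (pathOf file) (lnd.getD (pathOf file) 0 + 1))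
      (res.insert file (nameStr prefix_ file (lnd.getD (pathOf file) 0 + 1))) hinv'
    simpa using this

theorem transform_spec : Claim_equal_transform := by
  intro files prefix_ _ _
  unfold Spec_transform transform transform_alt
  have := altLoop_eq prefix_ [] (PySem.List.sorted files PySem.Str.lower false)
    PySem.Dict.empty PySem.Dict.empty (by intro q; simp [PySem.Dict.getD_empty])
  simp only [List.nil_append, List.length_nil] at this
  rw [this]
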